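/- GENERATED by mk_final_copies.py from the proof of the farm's unit `compute_sorted_huffman.4` (farm:compute_sorted_huffman.4.1: Proof.lean) as the
   re-elaboration sweep compiled it — do not edit. -/
import Vorbis.Spec.Units.compute_sorted_huffman_4

open X86 X86.User Asan Vorbis Vorbis.Spec

set_option maxRecDepth 4000
set_option maxHeartbeats 4000000

/-- Segment 4 of `compute_sorted_huffman` (`cut12` = 10B551H … `ret`, stb_vorbis_fixed.c:1257 `}`: `add rsp, 38H`, six pops,
`ret`): from the assertion `SortedHuffman.AtEpilogue` (= `Mid` + ZV in the current memory) to the function's `Returned`.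
The recipe of `Mid`'s doc comment (Vorbis/Spec/Codebook.lean): open the assertion and `Mid`, `v_entry` on `Mid.atEntry`, walk,
`v_returned`, then post / saved / same from the carried fields. -/
theorem Vorbis.Spec.Worked.compute_sorted_huffman_4_ok : Vorbis.Spec.compute_sorted_huffman_4.Statement := by
  intro Lay hLay μ hμ u₀ hcode others frames Blk ret e u hat
  -- 1. the assertion at 10B551H and the frame facts it carries
  obtain ⟨hrip, hmid, hzv⟩ := hat
  obtain ⟨he, hrsp, hra, h15, h14, h13, h12, hbp, hbx, hsame, hcodeok, hinv, hun⟩ := hmid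
  v_entry he
  -- 2. the present state's facts under the names the walker reads: DF, MXCSR, SseOK, the code span
  have hdf := hinv.1
  have hmx := hinv.2
  have hsse := Vorbis.sseOK_of_abiInv hinv
  have hspan : Mem.EqOn Vorbis.L.textLo Vorbis.L.textHi u₀.mem u.mem := hcodeok
  -- 3. 10B551H … 10B55FH (C line 1257): `add rsp, 38H`, the six pops (their slots are `h15` … `hbx`), the `ret` (`hra`)
  u_walk hcode [hμ.vendor] span [Vorbis.L.textLo, Vorbis.L.textHi] side (v_side)
  -- 4. the exit at the `ret`: `Returned … e ret` is about the ENTRY state `e`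
  refine ReachVia.done ?_
  v_returned
  · -- the post: no shadow byte written since the entry, and ZV in the final memory (the segment stores nothing)
    refine ⟨?_, ?_⟩
    · rw [w_mem]
      exact hun
    · rw [w_mem]
      exact hzv
  · -- the callee-saved registers: all six popped back from their slots
    intro r hr
    cases r <;> first
      | (exact absurd hr (by decide))
      | (with_reducible assumption)
  · -- the footprint: the segment stores nothing, so the carried footprint is the function's
    rw [w_mem]
    exact hsame
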